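-- pv_equiv track=rewrite | github.com/vochong/QuadraticSums | modsqrt2.py | exp3
-- ===== SOURCE A (Python) =====
-- def mult3(a,b,q,n):
--     t1 = (a[0]*b[2])%n
--     t2 = (a[1]*b[1])%n
--     t3 = (a[2]*b[0])%n
--     t1 = (t1+t2)%n
--     t1 = (t1+t3)%n
--     t2 = (a[1]*b[2])%n
--     t3 = (a[2]*b[1])%n
--     t2 = (t2+t3)%n
--     t3 = (a[2]*b[2])%n
--     t4 = (a[0]*b[1])%n
--     t5 = (a[1]*b[0])%n
--     t4 = (t4+t5)%n
--     t5 = (a[0]*b[0])%n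
--     t6 = ((n-1)*q[2])%n
--     t6 = (t4*t6)%n
--     t7 = (q[0]*q[2])%n
--     t7 = (t5*t7)%n
--     t6 = (t6+t7)%n
--     t10 = (t6+t3)%n
--     t6 = ((n-1)*q[1])%n
--     t6 = (t4*t6)%n
--     t7 = (q[0]*q[1])%n
--     t8 = ((n-1)*q[2])%n
--     t7 = (t7+t8)%n
--     t7 = (t5*t7)%n
--     t6 = (t6+t7)%n
--     t11 = (t6+t2)%n
--     t6 = ((n-1)*q[0])%n
--     t6 = (t4*t6)%n
--     t7 = (q[0]*q[0])%n
--     t8 = ((n-1)*q[1])%n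
--     t7 = (t7+t8)%n
--     t7 = (t5*t7)%n
--     t6 = (t6+t7)%n
--     t12 = (t6+t1)%n
--     c = [t12 , t11, t10]
--     return(c)
--
-- def exp3(e,g,q,n):
--     t = [0,0,1]
--     sq = g
--     e1 = e
--     while(e1!=0):
--         if (e1%2)==1:
--             t = mult3(sq,t,q,n)
--             e1 = (e1-1)//2
--         else:
--             e1 = e1//2
--         sq = mult3(sq,sq,q,n)
--     return(t)
-- ===== SOURCE B (Python) =====
-- # B: elements [a0,a1,a2] are a0*x^2+a1*x+a2 modulo x^3+q0*x^2+q1*x+q2; multiply by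
-- # polynomial convolution then two reduction steps, one mod at the end, and raise to the
-- # power e by top-down recursion (g^e = (g^(e//2))^2 * g^(e%2)) instead of A's
-- # bottom-up loop with a running square.  (Different decomposition, same cost.)
-- def poly_mul3(a, b, q, n):
--     # convolution: p[k] is the coefficient of x^(4-k)
--     p0 = a[0]*b[0]
--     p1 = a[0]*b[1] + a[1]*b[0]
--     p2 = a[0]*b[2] + a[1]*b[1] + a[2]*b[0]
--     p3 = a[1]*b[2] + a[2]*b[1]
--     p4 = a[2]*b[2]
--     # reduce x^4 then x^3 using x^3 = -(q0*x^2 + q1*x + q2)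
--     p1, p2, p3 = p1 - p0*q[0], p2 - p0*q[1], p3 - p0*q[2]
--     p2, p3, p4 = p2 - p1*q[0], p3 - p1*q[1], p4 - p1*q[2]
--     return [p2 % n, p3 % n, p4 % n]
--
-- def exp3(e, g, q, n):
--     if e == 0:
--         return [0, 0, 1]
--     r = exp3(e // 2, g, q, n)
--     r = poly_mul3(r, r, q, n)
--     if e % 2 == 1:
--         r = poly_mul3(g, r, q, n)
--     return r
-- ===== Notes on version B (the rewrite author's own statement) =====
-- stated objective: alternative
-- what changed: B replaces the module's 40-line step-by-step mult3 by a different multiplication routine (polynomial convolution, then two reduction steps by x^3 = -(q0*x^2+q1*x+q2), a single mod at the end) and replaces A's bottom-up while-loop with running-square variable by top-down recursion on e (g^e = (g^(e//2))^2 * g^(e%2)); agreement needs the two multiplies to coincide mod n and commutativity/associativity of the ring multiply.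
import Mathlib
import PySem

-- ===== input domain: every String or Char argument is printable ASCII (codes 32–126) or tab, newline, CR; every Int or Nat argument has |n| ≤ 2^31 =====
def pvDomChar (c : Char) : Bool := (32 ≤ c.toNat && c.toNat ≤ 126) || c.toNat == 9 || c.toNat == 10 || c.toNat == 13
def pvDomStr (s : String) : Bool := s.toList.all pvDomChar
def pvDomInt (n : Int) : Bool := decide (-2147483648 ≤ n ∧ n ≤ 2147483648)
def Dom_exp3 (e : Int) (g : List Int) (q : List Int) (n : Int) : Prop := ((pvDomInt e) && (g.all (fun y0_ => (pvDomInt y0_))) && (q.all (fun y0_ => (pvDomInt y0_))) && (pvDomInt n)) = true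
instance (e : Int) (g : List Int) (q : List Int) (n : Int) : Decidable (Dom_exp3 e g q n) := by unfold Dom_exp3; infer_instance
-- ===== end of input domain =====

-- B replaces the module's step-by-step mult3 by polynomial convolution + reduction and A's
-- bottom-up square-and-multiply loop by top-down recursion on e; return values proved equal on Pre_.

-- ===== PORT A =====
-- helper mult3 of Source A; list indexing a[i] is ported as PySem.List.pyGetD _ i 0, exact under
-- Pre_exp3 (lists of length ≥ 3; Python raises IndexError on shorter lists, excluded by Pre_).
def mult3 (a b q : List Int) (n : Int) : List Int :=
  let t1 := PySem.Int.mod (PySem.List.pyGetD a 0 0 * PySem.List.pyGetD b 2 0) n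
  let t2 := PySem.Int.mod (PySem.List.pyGetD a 1 0 * PySem.List.pyGetD b 1 0) n
  let t3 := PySem.Int.mod (PySem.List.pyGetD a 2 0 * PySem.List.pyGetD b 0 0) n
  let t1 := PySem.Int.mod (t1 + t2) n
  let t1 := PySem.Int.mod (t1 + t3) n
  let t2 := PySem.Int.mod (PySem.List.pyGetD a 1 0 * PySem.List.pyGetD b 2 0) n
  let t3 := PySem.Int.mod (PySem.List.pyGetD a 2 0 * PySem.List.pyGetD b 1 0) n
  let t2 := PySem.Int.mod (t2 + t3) n
  let t3 := PySem.Int.mod (PySem.List.pyGetD a 2 0 * PySem.List.pyGetD b 2 0) n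
  let t4 := PySem.Int.mod (PySem.List.pyGetD a 0 0 * PySem.List.pyGetD b 1 0) n
  let t5 := PySem.Int.mod (PySem.List.pyGetD a 1 0 * PySem.List.pyGetD b 0 0) n
  let t4 := PySem.Int.mod (t4 + t5) n
  let t5 := PySem.Int.mod (PySem.List.pyGetD a 0 0 * PySem.List.pyGetD b 0 0) n
  let t6 := PySem.Int.mod ((n - 1) * PySem.List.pyGetD q 2 0) n
  let t6 := PySem.Int.mod (t4 * t6) n
  let t7 := PySem.Int.mod (PySem.List.pyGetD q 0 0 * PySem.List.pyGetD q 2 0) n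
  let t7 := PySem.Int.mod (t5 * t7) n
  let t6 := PySem.Int.mod (t6 + t7) n
  let t10 := PySem.Int.mod (t6 + t3) n
  let t6 := PySem.Int.mod ((n - 1) * PySem.List.pyGetD q 1 0) n
  let t6 := PySem.Int.mod (t4 * t6) n
  let t7 := PySem.Int.mod (PySem.List.pyGetD q 0 0 * PySem.List.pyGetD q 1 0) n
  let t8 := PySem.Int.mod ((n - 1) * PySem.List.pyGetD q 2 0) n
  let t7 := PySem.Int.mod (t7 + t8) n
  let t7 := PySem.Int.mod (t5 * t7) n
  let t6 := PySem.Int.mod (t6 + t7) n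
  let t11 := PySem.Int.mod (t6 + t2) n
  let t6 := PySem.Int.mod ((n - 1) * PySem.List.pyGetD q 0 0) n
  let t6 := PySem.Int.mod (t4 * t6) n
  let t7 := PySem.Int.mod (PySem.List.pyGetD q 0 0 * PySem.List.pyGetD q 0 0) n
  let t8 := PySem.Int.mod ((n - 1) * PySem.List.pyGetD q 1 0) n
  let t7 := PySem.Int.mod (t7 + t8) n
  let t7 := PySem.Int.mod (t5 * t7) n
  let t6 := PySem.Int.mod (t6 + t7) n
  let t12 := PySem.Int.mod (t6 + t1) n
  [t12, t11, t10]

-- A's while-loop, ported with a Nat fuel bound (e.toNat + 1 steps always suffice for e ≥ 0;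
-- the fuel guard only makes the port total: Python exits at e1 = 0 and loops forever for
-- e1 < 0, which Pre_exp3 excludes).
def exp3Loop (q : List Int) (n : Int) : Nat → List Int → List Int → Int → List Int
  | 0, t, _, _ => t
  | fuel + 1, t, sq, e1 =>
    if e1 = 0 then t
    else if PySem.Int.mod e1 2 = 1 then
      exp3Loop q n fuel (mult3 sq t q n) (mult3 sq sq q n) (PySem.Int.floordiv (e1 - 1) 2)
    else
      exp3Loop q n fuel t (mult3 sq sq q n) (PySem.Int.floordiv e1 2)

def exp3 (e : Int) (g : List Int) (q : List Int) (n : Int) : List Int :=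
  exp3Loop q n (e.toNat + 1) [0, 0, 1] g e

-- ===== PORT B =====
-- Source B's poly_mul3: convolution coefficients, two reduction steps by x^3 = -(q0 x^2 + q1 x + q2),
-- one mod at the end; indexing a[i] again ported as pyGetD _ i 0 (exact under Pre_exp3).
def polyMul3 (a b q : List Int) (n : Int) : List Int :=
  let p0 := PySem.List.pyGetD a 0 0 * PySem.List.pyGetD b 0 0
  let p1 := PySem.List.pyGetD a 0 0 * PySem.List.pyGetD b 1 0 + PySem.List.pyGetD a 1 0 * PySem.List.pyGetD b 0 0
  let p2 := PySem.List.pyGetD a 0 0 * PySem.List.pyGetD b 2 0 + PySem.List.pyGetD a 1 0 * PySem.List.pyGetD b 1 0 + PySem.List.pyGetD a 2 0 * PySem.List.pyGetD b 0 0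
  let p3 := PySem.List.pyGetD a 1 0 * PySem.List.pyGetD b 2 0 + PySem.List.pyGetD a 2 0 * PySem.List.pyGetD b 1 0
  let p4 := PySem.List.pyGetD a 2 0 * PySem.List.pyGetD b 2 0
  let p1' := p1 - p0 * PySem.List.pyGetD q 0 0
  let p2' := p2 - p0 * PySem.List.pyGetD q 1 0
  let p3' := p3 - p0 * PySem.List.pyGetD q 2 0
  let p2'' := p2' - p1' * PySem.List.pyGetD q 0 0
  let p3'' := p3' - p1' * PySem.List.pyGetD q 1 0
  let p4' := p4 - p1' * PySem.List.pyGetD q 2 0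
  [PySem.Int.mod p2'' n, PySem.Int.mod p3'' n, PySem.Int.mod p4' n]

-- top-down recursion of Source B, with the same kind of Nat fuel bound (the guard only makes the
-- port total: Python tests e == 0 and recurses forever for e < 0, which Pre_exp3 excludes).
def exp3AltGo (g q : List Int) (n : Int) : Nat → Int → List Int
  | 0, _ => [0, 0, 1]
  | fuel + 1, e =>
    if e = 0 then [0, 0, 1]
    else
      let r := exp3AltGo g q n fuel (PySem.Int.floordiv e 2)
      let r2 := polyMul3 r r q n
      if PySem.Int.mod e 2 = 1 then polyMul3 g r2 q n else r2

def exp3_alt (e : Int) (g : List Int) (q : List Int) (n : Int) : List Int :=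
  exp3AltGo g q n (e.toNat + 1) e

-- ===== PRECONDITION & SPEC =====
-- Pre_: A loops forever for e < 0, and for e ≠ 0 it calls mult3, which raises ZeroDivisionError
-- when n = 0 and IndexError when g or q has fewer than 3 elements; exactly those inputs are excluded.
def Pre_exp3 (e : Int) (g : List Int) (q : List Int) (n : Int) : Prop :=
  0 ≤ e ∧ (e = 0 ∨ (n ≠ 0 ∧ 3 ≤ g.length ∧ 3 ≤ q.length))
instance (e : Int) (g : List Int) (q : List Int) (n : Int) : Decidable (Pre_exp3 e g q n) := by
  unfold Pre_exp3; infer_instance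
def pvWitness_exp3 : Int × List Int × List Int × Int := (5, [1, 2, 3], [1, 1, 1], 7)

def Spec_exp3 (e : Int) (g : List Int) (q : List Int) (n : Int) (out : List Int) : Prop := out = exp3_alt e g q n
instance (e : Int) (g : List Int) (q : List Int) (n : Int) (out : List Int) : Decidable (Spec_exp3 e g q n out) := by unfold Spec_exp3; infer_instance

-- ===== CLAIM (what is proved, stated in full; the proofs are below) =====
def Claim_equal_exp3 : Prop := ∀ (e : Int) (g : List Int) (q : List Int) (n : Int), Dom_exp3 e g q n → Pre_exp3 e g q n → Spec_exp3 e g q n (exp3 e g q n)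

-- ===== LEMMAS AND PROOFS =====

-- modular-arithmetic toolkit: PySem.Int.mod _ n is constant on residue classes, read off in ZMod n.natAbs
theorem pvCastSelf (n : Int) : ((n : Int) : ZMod n.natAbs) = 0 :=
  (ZMod.intCast_zmod_eq_zero_iff_dvd n n.natAbs).mpr (Int.natAbs_dvd.mpr dvd_rfl)

theorem pvFmCongr {n X Y : Int} (h : ((X : ZMod n.natAbs)) = (Y : ZMod n.natAbs)) :
    PySem.Int.mod X n = PySem.Int.mod Y n := by
  have hdvd : (n.natAbs : Int) ∣ X - Y :=
    (ZMod.intCast_zmod_eq_zero_iff_dvd (X - Y) n.natAbs).mp (by push_cast; rw [sub_eq_zero]; exact h)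
  obtain ⟨k, hk⟩ := Int.natAbs_dvd.mp hdvd
  have hX : X = Y + n * k := by omega
  simp only [PySem.Int.mod, hX, Int.add_mul_fmod_self_left]

@[simp] theorem pvCastFm (a n : Int) : ((PySem.Int.mod a n : Int) : ZMod n.natAbs) = (a : ZMod n.natAbs) := by
  simp only [PySem.Int.mod, Int.fmod_def]
  push_cast
  rw [pvCastSelf]
  ring

-- semantic value of the first three entries, and a shared normal form for both multiplies
def pvVal (n : Int) (l : List Int) : Int × Int × Int :=
  (PySem.Int.mod (PySem.List.pyGetD l 0 0) n,
   PySem.Int.mod (PySem.List.pyGetD l 1 0) n,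
   PySem.Int.mod (PySem.List.pyGetD l 2 0) n)

def pvNf (q : List Int) (n : Int) (A B : Int × Int × Int) : List Int :=
  let q0 := PySem.List.pyGetD q 0 0
  let q1 := PySem.List.pyGetD q 1 0
  let q2 := PySem.List.pyGetD q 2 0
  let t4 := A.1 * B.2.1 + A.2.1 * B.1
  let t5 := A.1 * B.1
  [PySem.Int.mod (A.1 * B.2.2 + A.2.1 * B.2.1 + A.2.2 * B.1 - t4 * q0 + t5 * (q0 * q0 - q1)) n,
   PySem.Int.mod (A.2.1 * B.2.2 + A.2.2 * B.2.1 - t4 * q1 + t5 * (q0 * q1 - q2)) n,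
   PySem.Int.mod (A.2.2 * B.2.2 - t4 * q2 + t5 * (q0 * q2)) n]

theorem pvMultNorm (a b q : List Int) (n : Int) :
    mult3 a b q n = pvNf q n (pvVal n a) (pvVal n b) := by
  simp only [mult3, pvNf, pvVal, List.cons.injEq, and_true]
  refine ⟨?_, ?_, ?_⟩ <;>
    (apply pvFmCongr; push_cast [pvCastFm]; rw [pvCastSelf]; ring)

-- B's convolution-and-reduce multiply has the same normal form, hence equals A's mult3
theorem pvPolyNorm (a b q : List Int) (n : Int) :
    polyMul3 a b q n = pvNf q n (pvVal n a) (pvVal n b) := by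
  simp only [polyMul3, pvNf, pvVal, List.cons.injEq, and_true]
  refine ⟨?_, ?_, ?_⟩ <;>
    (apply pvFmCongr; push_cast [pvCastFm]; ring)

theorem pvPolyEq (a b q : List Int) (n : Int) : polyMul3 a b q n = mult3 a b q n := by
  rw [pvPolyNorm, pvMultNorm]

theorem pvCongrR (a b b' q : List Int) (n : Int) (h : pvVal n b = pvVal n b') :
    mult3 a b q n = mult3 a b' q n := by
  rw [pvMultNorm, pvMultNorm, h]

theorem pvComm (a b q : List Int) (n : Int) : mult3 a b q n = mult3 b a q n := by
  rw [pvMultNorm, pvMultNorm]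
  simp only [pvNf, List.cons.injEq, and_true]
  refine ⟨?_, ?_, ?_⟩ <;> (apply pvFmCongr; push_cast; ring)

-- indexing a 3-element literal list (the shape of every mult3 output)
@[simp] theorem pvGetD0 (x y z : Int) : PySem.List.pyGetD [x, y, z] 0 0 = x := rfl
@[simp] theorem pvGetD1 (x y z : Int) : PySem.List.pyGetD [x, y, z] 1 0 = y := rfl
@[simp] theorem pvGetD2 (x y z : Int) : PySem.List.pyGetD [x, y, z] 2 0 = z := rfl

theorem pvAssoc (a b c q : List Int) (n : Int) :
    mult3 (mult3 a b q n) c q n = mult3 a (mult3 b c q n) q n := by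
  rw [pvMultNorm (mult3 a b q n), pvMultNorm a b, pvMultNorm a (mult3 b c q n), pvMultNorm b c]
  simp only [pvNf, pvVal, pvGetD0, pvGetD1, pvGetD2, List.cons.injEq, and_true]
  refine ⟨?_, ?_, ?_⟩ <;> (apply pvFmCongr; push_cast [pvCastFm]; ring)

-- right multiplication by the identity [0,0,1] is invisible to pvVal
theorem pvValId (x q : List Int) (n : Int) :
    pvVal n (mult3 x [0, 0, 1] q n) = pvVal n x := by
  rw [pvMultNorm]
  simp only [pvNf, pvVal, pvGetD0, pvGetD1, pvGetD2, Prod.mk.injEq]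
  refine ⟨?_, ?_, ?_⟩ <;> (apply pvFmCongr; push_cast [pvCastFm]; ring)

-- and on a mult3 output it is the literal identity
theorem pvMultId (a b q : List Int) (n : Int) :
    mult3 (mult3 a b q n) [0, 0, 1] q n = mult3 a b q n := by
  conv_lhs => rw [pvMultNorm, pvMultNorm a b]
  conv_rhs => rw [pvMultNorm a b]
  simp only [pvNf, pvVal, pvGetD0, pvGetD1, pvGetD2, List.cons.injEq, and_true]
  refine ⟨?_, ?_, ?_⟩ <;> (apply pvFmCongr; push_cast [pvCastFm]; ring)

-- pvPw q n x m = x^(m+1) in the cubic ring, associated to the right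
def pvPw (q : List Int) (n : Int) (x : List Int) : Nat → List Int
  | 0 => x
  | m + 1 => mult3 x (pvPw q n x m) q n

theorem pvPwAdd (q : List Int) (n : Int) (x : List Int) (a b : Nat) :
    pvPw q n x (a + b + 1) = mult3 (pvPw q n x a) (pvPw q n x b) q n := by
  induction a with
  | zero =>
    rw [show 0 + b + 1 = b + 1 from by omega]
    rfl
  | succ a ih =>
    rw [show a + 1 + b + 1 = (a + b + 1) + 1 from by omega, pvPw, ih, ← pvAssoc]
    rfl

theorem pvPwDbl (q : List Int) (n : Int) (x : List Int) (m : Nat) :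
    pvPw q n (mult3 x x q n) m = pvPw q n x (2 * m + 1) := by
  induction m with
  | zero => rfl
  | succ m ih =>
    show mult3 (mult3 x x q n) (pvPw q n (mult3 x x q n) m) q n = pvPw q n x (2 * (m + 1) + 1)
    rw [ih, pvAssoc, show 2 * (m + 1) + 1 = (2 * m + 1) + 1 + 1 from by omega]
    rfl

theorem pvShift (q : List Int) (n : Int) (x t : List Int) (m : Nat) :
    mult3 (pvPw q n x m) (mult3 x t q n) q n = mult3 (pvPw q n x (m + 1)) t q n := by
  rw [pvComm, pvAssoc, pvCongrR x (mult3 t (pvPw q n x m) q n) (mult3 (pvPw q n x m) t q n) q n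
      (by rw [pvComm]), ← pvAssoc]
  rfl

-- A's loop computes sq^(e1) * t  (for e1 ≥ 1)
theorem pvLoopZero (q : List Int) (n : Int) (fuel : Nat) (t sq : List Int) :
    exp3Loop q n fuel t sq 0 = t := by
  cases fuel with
  | zero => rfl
  | succ fuel => simp [exp3Loop]

theorem pvLoopA (q : List Int) (n : Int) :
    ∀ (fuel : Nat) (e1 : Int), e1.toNat < fuel → 1 ≤ e1 → ∀ (t sq : List Int),
      exp3Loop q n fuel t sq e1 = mult3 (pvPw q n sq (e1.toNat - 1)) t q n := by
  intro fuel
  induction fuel with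
  | zero => intro e1 h h1; omega
  | succ fuel ih =>
    intro e1 hlt h1 t sq
    rw [exp3Loop, if_neg (by omega : ¬ e1 = 0)]
    rw [PySem.Int.mod_eq_emod_of_pos (by omega : (0:Int) < 2)]
    rw [PySem.Int.floordiv_eq_ediv_of_pos (by omega : (0:Int) < 2),
        PySem.Int.floordiv_eq_ediv_of_pos (by omega : (0:Int) < 2)]
    by_cases hodd : e1 % 2 = 1
    · rw [if_pos hodd]
      by_cases he1 : e1 = 1
      · subst he1
        norm_num
        rw [pvLoopZero]
        rfl
      · have hrec := ih ((e1 - 1) / 2) (by omega) (by omega) (mult3 sq t q n) (mult3 sq sq q n)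
        rw [hrec]
        have h1' : 1 ≤ ((e1 - 1) / 2).toNat := by omega
        rw [pvPwDbl, pvShift]
        congr 2
        omega
    · rw [if_neg hodd]
      have hrec := ih (e1 / 2) (by omega) (by omega) t (mult3 sq sq q n)
      rw [hrec, pvPwDbl]
      congr 2
      omega

-- B computes g^e * 1  (for e ≥ 1)
theorem pvAltZero (g q : List Int) (n : Int) (fuel : Nat) :
    exp3AltGo g q n fuel 0 = [0, 0, 1] := by
  cases fuel with
  | zero => rfl
  | succ fuel => simp [exp3AltGo]

theorem pvAltB (g q : List Int) (n : Int) :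
    ∀ (fuel : Nat) (e : Int), e.toNat < fuel → 1 ≤ e →
      exp3AltGo g q n fuel e = mult3 (pvPw q n g (e.toNat - 1)) [0, 0, 1] q n := by
  intro fuel
  induction fuel with
  | zero => intro e h h1; omega
  | succ fuel ih =>
    intro e hlt h1
    rw [exp3AltGo, if_neg (by omega : ¬ e = 0)]
    rw [PySem.Int.mod_eq_emod_of_pos (by omega : (0:Int) < 2)]
    rw [PySem.Int.floordiv_eq_ediv_of_pos (by omega : (0:Int) < 2)]
    show (if e % 2 = 1 then polyMul3 g (polyMul3 (exp3AltGo g q n fuel (e / 2)) (exp3AltGo g q n fuel (e / 2)) q n) q n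
          else polyMul3 (exp3AltGo g q n fuel (e / 2)) (exp3AltGo g q n fuel (e / 2)) q n)
          = mult3 (pvPw q n g (e.toNat - 1)) [0, 0, 1] q n
    simp only [pvPolyEq]
    by_cases h2 : e = 1
    · subst h2
      rw [show ((1:Int) / 2) = 0 from by decide, pvAltZero,
          if_pos (show (1:Int) % 2 = 1 from by decide)]
      exact pvCongrR g (mult3 [0,0,1] [0,0,1] q n) [0,0,1] q n (pvValId [0,0,1] q n)
    · have hrec := ih (e / 2) (by omega) (by omega)
      rw [hrec]
      have h1' : 1 ≤ ((e / 2).toNat) := by omega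
      have hsq : mult3 (mult3 (pvPw q n g ((e / 2).toNat - 1)) [0,0,1] q n)
                       (mult3 (pvPw q n g ((e / 2).toNat - 1)) [0,0,1] q n) q n
          = pvPw q n g (2 * (e / 2).toNat - 1) := by
        rw [pvCongrR (mult3 (pvPw q n g ((e / 2).toNat - 1)) [0,0,1] q n)
              (mult3 (pvPw q n g ((e / 2).toNat - 1)) [0,0,1] q n)
              (pvPw q n g ((e / 2).toNat - 1)) q n (pvValId (pvPw q n g ((e / 2).toNat - 1)) q n)]
        rw [pvComm]
        rw [pvCongrR (pvPw q n g ((e / 2).toNat - 1))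
              (mult3 (pvPw q n g ((e / 2).toNat - 1)) [0,0,1] q n)
              (pvPw q n g ((e / 2).toNat - 1)) q n (pvValId (pvPw q n g ((e / 2).toNat - 1)) q n)]
        rw [← pvPwAdd]
        congr 1
        omega
      by_cases hodd : e % 2 = 1
      · rw [if_pos hodd, hsq, show e.toNat - 1 = 2 * (e / 2).toNat from by omega]
        have hp : pvPw q n g (2 * (e / 2).toNat)
            = mult3 g (pvPw q n g (2 * (e / 2).toNat - 1)) q n := by
          rw [show 2 * (e / 2).toNat = (2 * (e / 2).toNat - 1) + 1 from by omega]
          rfl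
        rw [hp, pvMultId]
      · rw [if_neg hodd, hsq, show e.toNat - 1 = 2 * (e / 2).toNat - 1 from by omega]
        rw [show 2 * (e / 2).toNat - 1 = (2 * (e / 2).toNat - 2) + 1 from by omega]
        rw [pvPw]
        exact (pvMultId g (pvPw q n g (2 * (e / 2).toNat - 2)) q n).symm

-- ===== VERDICT (by name: the statement is the Claim_ definition above) =====
theorem exp3_spec : Claim_equal_exp3 := by
  intro e g q n _ hpre
  unfold Spec_exp3
  obtain ⟨he0, _⟩ := hpre
  by_cases he : e = 0
  · subst he
    show exp3Loop q n (Int.toNat 0 + 1) [0, 0, 1] g 0 = exp3AltGo g q n (Int.toNat 0 + 1) 0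
    rw [pvLoopZero, pvAltZero]
  · show exp3Loop q n (e.toNat + 1) [0, 0, 1] g e = exp3AltGo g q n (e.toNat + 1) e
    rw [pvLoopA q n (e.toNat + 1) e (by omega) (by omega),
        pvAltB g q n (e.toNat + 1) e (by omega) (by omega)]
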